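-- pv_equiv track=rewrite | github.com/ada-f/rel | algebra_benchmark/rpm_numeric.py | _branch_style_row_context
-- ===== SOURCE A (Python) =====
-- def _branch_style_row_context(cell_strings: list[str], n: int, nshow: int) -> str:
--     """
--     Same template as ``rpm_dataset.Branch._context`` (raven-large-language-models).
--     ``cell_strings`` is row-major length ``n*n - 1`` (missing bottom-right).
--     """
--     if len(cell_strings) != n * n - 1:
--         raise ValueError(f"Expected {n * n - 1} cells, got {len(cell_strings)}")
--     arr = cell_strings
--     tpl = ""
--     for row in range(nshow):
--         tpl = tpl + "row " + str(row + 1) + ": {}"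
--         if row < nshow - 1:
--             for _ in range(1, n):
--                 tpl += ", {}"
--             tpl += "; "
--         else:
--             for _ in range(1, n - 1):
--                 tpl += ", {}"
--             tpl += ", "
--     return tpl.format(*arr[((n - nshow) * n) : (n**2 - 1)])
-- ===== SOURCE B (Python) =====
-- def _branch_style_row_context(cell_strings: list[str], n: int, nshow: int) -> str:
--     if len(cell_strings) != n * n - 1:
--         raise ValueError(f"Expected {n * n - 1} cells, got {len(cell_strings)}")
--     sub = cell_strings[(n - nshow) * n : n**2 - 1]
--     pieces = []
--     i = 0
--     for row in range(nshow):
--         take = n if row < nshow - 1 else n - 1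
--         pieces.append("row " + str(row + 1) + ": " + ", ".join(sub[i:i + take]))
--         pieces.append("; " if row < nshow - 1 else ", ")
--         i += take
--     return "".join(pieces)
-- ===== Notes on version B (the rewrite author's own statement) =====
-- stated objective: idiomatic
-- what changed: B drops the placeholder-template + str.format mechanism entirely: it slices the shown cells once and builds each row directly by joining its cells with ', ', concatenating the labelled row pieces into the result, instead of first growing a '{}' template character string and then formatting it.
import Mathlib
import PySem

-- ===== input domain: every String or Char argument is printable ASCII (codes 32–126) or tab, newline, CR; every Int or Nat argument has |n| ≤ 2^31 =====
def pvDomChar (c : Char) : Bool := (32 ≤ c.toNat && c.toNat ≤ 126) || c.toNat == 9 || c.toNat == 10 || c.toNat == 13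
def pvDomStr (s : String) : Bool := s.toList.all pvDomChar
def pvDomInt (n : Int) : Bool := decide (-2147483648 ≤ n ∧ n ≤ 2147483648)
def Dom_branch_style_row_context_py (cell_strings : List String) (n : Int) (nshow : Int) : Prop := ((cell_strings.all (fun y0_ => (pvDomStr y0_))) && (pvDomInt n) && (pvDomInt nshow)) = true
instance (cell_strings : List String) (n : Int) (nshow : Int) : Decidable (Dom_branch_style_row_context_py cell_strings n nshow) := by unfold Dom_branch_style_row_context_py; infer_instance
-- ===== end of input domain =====

-- B builds each labelled row directly (slice + ', '.join) instead of A's '{}'-placeholder template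
-- grown character by character and then passed through str.format; same output, no format pass.

-- ===== PORT A =====
-- Python str.format specialised to the templates A builds: every '{' A writes is immediately
-- followed by '}' (a bare "{}" placeholder), so this scanner is exact on A's templates whenever
-- enough arguments are supplied; where CPython would raise (stray brace or exhausted arguments —
-- unreachable under Pre_) it returns a fallback instead of a value.
def pyFormatGo (cs : List Char) (args : List String) : List Char :=
  match cs with
  | [] => []
  | c :: rest =>
    if c = '{' then
      match rest with
      | [] => []                  -- CPython: ValueError (single '{'); unreachable under Pre_
      | d :: rest' =>
        if d = '}' then
          match args with
          | [] => []              -- CPython: IndexError (too few arguments); unreachable under Pre_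
          | a :: as => a.toList ++ pyFormatGo rest' as
        else []                   -- CPython: ValueError; A never writes '{' without '}'
    else c :: pyFormatGo rest args

def branch_style_row_context_py (cell_strings : List String) (n : Int) (nshow : Int) : String :=
  if (cell_strings.length : Int) ≠ n * n - 1 then ""   -- Python raises ValueError here (outside Pre_)
  else
    let tpl : List Char := (PySem.List.pyRange 0 nshow 1).foldl (fun tpl row =>
      let tpl := tpl ++ "row ".toList ++ PySem.Int.toChars (row + 1) ++ ": {}".toList
      if row < nshow - 1 then
        ((PySem.List.pyRange 1 n 1).foldl (fun t _ => t ++ ", {}".toList) tpl) ++ "; ".toList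
      else
        ((PySem.List.pyRange 1 (n - 1) 1).foldl (fun t _ => t ++ ", {}".toList) tpl) ++ ", ".toList) []
    String.ofList (pyFormatGo tpl (PySem.List.slice cell_strings (some ((n - nshow) * n)) (some (n ^ 2 - 1))))

-- ===== PORT B =====
def branch_style_row_context_py_alt (cell_strings : List String) (n : Int) (nshow : Int) : String :=
  if (cell_strings.length : Int) ≠ n * n - 1 then ""   -- Python raises ValueError here (outside Pre_)
  else
    let sub := PySem.List.slice cell_strings (some ((n - nshow) * n)) (some (n ^ 2 - 1))
    let st := (PySem.List.pyRange 0 nshow 1).foldl (fun (st : List (List Char) × Int) row =>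
      let take := if row < nshow - 1 then n else n - 1
      let piece := "row ".toList ++ PySem.Int.toChars (row + 1) ++ ": ".toList ++
        PySem.Chars.join ", ".toList ((PySem.List.slice sub (some st.2) (some (st.2 + take))).map String.toList)
      let sep := if row < nshow - 1 then "; ".toList else ", ".toList
      (st.1 ++ [piece, sep], st.2 + take)) ([], 0)
    String.ofList (PySem.Chars.join [] st.1)

-- ===== PRECONDITION & SPEC =====
-- Pre_ is exactly A's return domain: the length check must pass (else ValueError), and either
-- nshow ≤ 0 (empty template, A returns "") or 1 ≤ nshow ≤ n with 2 ≤ n — on every other input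
-- A's template has more '{}' placeholders than the slice supplies arguments and str.format
-- raises IndexError, so A returns nothing there.
def Pre_branch_style_row_context_py (cell_strings : List String) (n : Int) (nshow : Int) : Prop :=
  (cell_strings.length : Int) = n * n - 1 ∧ (nshow ≤ 0 ∨ (1 ≤ nshow ∧ nshow ≤ n ∧ 2 ≤ n))
instance (cell_strings : List String) (n : Int) (nshow : Int) : Decidable (Pre_branch_style_row_context_py cell_strings n nshow) := by unfold Pre_branch_style_row_context_py; infer_instance
def pvWitness_branch_style_row_context_py : List String × Int × Int := (["a", "b", "c"], 2, 2)

def Spec_branch_style_row_context_py (cell_strings : List String) (n : Int) (nshow : Int) (out : String) : Prop := out = branch_style_row_context_py_alt cell_strings n nshow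
instance (cell_strings : List String) (n : Int) (nshow : Int) (out : String) : Decidable (Spec_branch_style_row_context_py cell_strings n nshow out) := by unfold Spec_branch_style_row_context_py; infer_instance

-- ===== CLAIM (what is proved, stated in full; the proofs are below) =====
def Claim_equal_branch_style_row_context_py : Prop := ∀ (cell_strings : List String) (n : Int) (nshow : Int), Dom_branch_style_row_context_py cell_strings n nshow → Pre_branch_style_row_context_py cell_strings n nshow → Spec_branch_style_row_context_py cell_strings n nshow (branch_style_row_context_py cell_strings n nshow)

-- ===== LEMMAS AND PROOFS =====

-- Common shape of both outputs: the rows from `row` on, `k` rows remaining, fed by `args`.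
def rowsOut (nn : Int) (row : Int) (k : Nat) (args : List String) : List Char :=
  match k with
  | 0 => []
  | Nat.succ k =>
    "row ".toList ++ PySem.Int.toChars (row + 1) ++ ": ".toList ++
      PySem.Chars.join ", ".toList
        ((args.take (if k = 0 then (nn - 1).toNat else nn.toNat)).map String.toList) ++
      ((if k = 0 then ", ".toList else "; ".toList) ++
        rowsOut nn (row + 1) k (args.drop (if k = 0 then (nn - 1).toNat else nn.toNat)))

def litRow (row : Int) : List Char := "row ".toList ++ PySem.Int.toChars (row + 1) ++ ": ".toList
def chunkBody (m : Nat) : List Char := '{' :: '}' :: (List.replicate m (", {}".toList)).flatten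

-- A's template for the rows from `row` on, `k` rows remaining.
def tplFrom (nn : Int) (row : Int) (k : Nat) : List Char :=
  match k with
  | 0 => []
  | Nat.succ k =>
    litRow row ++ (chunkBody (if k = 0 then (nn - 2).toNat else (nn - 1).toNat) ++
      ((if k = 0 then ", ".toList else "; ".toList) ++ tplFrom nn (row + 1) k))

-- number of format arguments `k` rows consume
def needArgs (nn : Int) (k : Nat) : Nat :=
  match k with
  | 0 => 0
  | Nat.succ k => (if k = 0 then (nn - 1).toNat else nn.toNat) + needArgs nn k

theorem needArgs_succ (nn : Int) (k : Nat) :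
    needArgs nn (k + 1) = (if k = 0 then (nn - 1).toNat else nn.toNat) + needArgs nn k := rfl

theorem lit_colon : ": {}".toList = ": ".toList ++ ['{', '}'] := by decide
theorem lit_comma : ", {}".toList = [',', ' '] ++ ['{', '}'] := by decide

theorem pyFormatGo_cons_ne (c : Char) (rest : List Char) (args : List String) (hc : c ≠ '{') :
    pyFormatGo (c :: rest) args = c :: pyFormatGo rest args := by
  rw [pyFormatGo.eq_def]; simp [hc]

theorem pyFormatGo_placeholder (rest : List Char) (a : String) (as : List String) :
    pyFormatGo ('{' :: '}' :: rest) (a :: as) = a.toList ++ pyFormatGo rest as := by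
  rw [pyFormatGo.eq_def]; simp

theorem digitChar_ne_brace (m : Nat) : Nat.digitChar m ≠ '{' := by
  unfold Nat.digitChar
  by_cases h0 : m = 0
  · rw [if_pos h0]; decide
  rw [if_neg h0]
  by_cases h1 : m = 1
  · rw [if_pos h1]; decide
  rw [if_neg h1]
  by_cases h2 : m = 2
  · rw [if_pos h2]; decide
  rw [if_neg h2]
  by_cases h3 : m = 3
  · rw [if_pos h3]; decide
  rw [if_neg h3]
  by_cases h4 : m = 4
  · rw [if_pos h4]; decide
  rw [if_neg h4]
  by_cases h5 : m = 5
  · rw [if_pos h5]; decide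
  rw [if_neg h5]
  by_cases h6 : m = 6
  · rw [if_pos h6]; decide
  rw [if_neg h6]
  by_cases h7 : m = 7
  · rw [if_pos h7]; decide
  rw [if_neg h7]
  by_cases h8 : m = 8
  · rw [if_pos h8]; decide
  rw [if_neg h8]
  by_cases h9 : m = 9
  · rw [if_pos h9]; decide
  rw [if_neg h9]
  by_cases h10 : m = 10
  · rw [if_pos h10]; decide
  rw [if_neg h10]
  by_cases h11 : m = 11
  · rw [if_pos h11]; decide
  rw [if_neg h11]
  by_cases h12 : m = 12
  · rw [if_pos h12]; decide
  rw [if_neg h12]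
  by_cases h13 : m = 13
  · rw [if_pos h13]; decide
  rw [if_neg h13]
  by_cases h14 : m = 14
  · rw [if_pos h14]; decide
  rw [if_neg h14]
  by_cases h15 : m = 15
  · rw [if_pos h15]; decide
  rw [if_neg h15]
  decide

theorem toDigitsCore_no_brace (f n : Nat) (acc : List Char) (h : '{' ∉ acc) :
    '{' ∉ Nat.toDigitsCore 10 f n acc := by
  induction f generalizing n acc with
  | zero => simpa [Nat.toDigitsCore] using h
  | succ f ih =>
    simp only [Nat.toDigitsCore]
    split
    · intro hm
      rcases List.mem_cons.mp hm with h1 | h1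
      · exact digitChar_ne_brace _ h1.symm
      · exact h h1
    · exact ih _ _ (by
        intro hm
        rcases List.mem_cons.mp hm with h1 | h1
        · exact digitChar_ne_brace _ h1.symm
        · exact h h1)

theorem toChars_no_brace (z : Int) : '{' ∉ PySem.Int.toChars z := by
  unfold PySem.Int.toChars
  split
  · intro hm
    rcases List.mem_cons.mp hm with h1 | h1
    · exact absurd h1 (by decide)
    · exact toDigitsCore_no_brace _ _ [] (by simp) h1
  · exact toDigitsCore_no_brace _ _ [] (by simp)

theorem litRow_no_brace (row : Int) : '{' ∉ litRow row := by
  unfold litRow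
  intro hm
  rcases List.mem_append.mp hm with hm | hm
  · rcases List.mem_append.mp hm with hm | hm
    · exact absurd hm (by decide)
    · exact toChars_no_brace _ hm
  · exact absurd hm (by decide)

theorem fmt_lit (lit rest : List Char) (args : List String) (h : '{' ∉ lit) :
    pyFormatGo (lit ++ rest) args = lit ++ pyFormatGo rest args := by
  induction lit with
  | nil => simp
  | cons c cs ih =>
    have hc : c ≠ '{' := fun hh => h (hh ▸ List.mem_cons_self)
    have hcs : '{' ∉ cs := fun hh => h (List.mem_cons_of_mem _ hh)
    rw [List.cons_append, pyFormatGo_cons_ne _ _ _ hc, ih hcs, List.cons_append]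

theorem join_cons_of_ne_nil (sep x : List Char) (l : List (List Char)) (h : l ≠ []) :
    PySem.Chars.join sep (x :: l) = x ++ sep ++ PySem.Chars.join sep l := by
  cases l with
  | nil => exact absurd rfl h
  | cons y t => rw [PySem.Chars.join_cons_cons]

theorem join_nil_eq_flatten (ps : List (List Char)) :
    PySem.Chars.join [] ps = ps.flatten := by
  induction ps with
  | nil => rfl
  | cons x t ih =>
    cases t with
    | nil => simp [PySem.Chars.join_singleton]
    | cons y s => rw [join_cons_of_ne_nil _ _ _ (by simp), ih]; simp

theorem fmt_rep (m : Nat) (args : List String) (rest : List Char) (h : m < args.length) :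
    pyFormatGo (chunkBody m ++ rest) args =
      PySem.Chars.join ", ".toList ((args.take (m + 1)).map String.toList) ++
        pyFormatGo rest (args.drop (m + 1)) := by
  induction m generalizing args with
  | zero =>
    cases args with
    | nil => simp at h
    | cons a as =>
      have hsh : chunkBody 0 ++ rest = '{' :: '}' :: rest := by simp [chunkBody]
      rw [hsh, pyFormatGo_placeholder]
      simp [PySem.Chars.join_singleton]
  | succ m ih =>
    cases args with
    | nil => simp at h
    | cons a as =>
      have hm : m < as.length := by simpa using h
      have hshape : chunkBody (m + 1) ++ rest =
          '{' :: '}' :: ([',', ' '] ++ (chunkBody m ++ rest)) := by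
        simp [chunkBody, List.replicate_succ, lit_comma]
      rw [hshape, pyFormatGo_placeholder, fmt_lit [',', ' '] _ _ (by decide), ih as hm]
      have hne : (as.take (m + 1)).map String.toList ≠ [] := by
        have h2 : as.take (m + 1) ≠ [] := by
          cases as with
          | nil => simp at hm
          | cons b bs => simp
        simpa using h2
      have htk : (a :: as).take (m + 1 + 1) = a :: as.take (m + 1) := rfl
      rw [htk, List.map_cons, join_cons_of_ne_nil _ _ _ hne]
      simp

theorem foldl_append_const {α : Type} (l : List α) (s : List Char) (t : List Char) :
    l.foldl (fun t _ => t ++ s) t = t ++ (List.replicate l.length s).flatten := by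
  induction l generalizing t with
  | nil => simp
  | cons x xs ih => simp [List.foldl_cons, ih, List.replicate_succ]

theorem fmt_tpl (nn : Int) (hn : 2 ≤ nn) :
    ∀ (k : Nat) (r : Int) (args : List String), args.length = needArgs nn k →
      pyFormatGo (tplFrom nn r k) args = rowsOut nn r k args := by
  intro k
  induction k with
  | zero => intro r args _; rfl
  | succ k ih =>
    intro r args hlen
    have hm1 : (if k = 0 then (nn - 2).toNat else (nn - 1).toNat) + 1 =
        (if k = 0 then (nn - 1).toNat else nn.toNat) := by
      split <;> omega
    have hlt : (if k = 0 then (nn - 2).toNat else (nn - 1).toNat) < args.length := by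
      rw [hlen, needArgs_succ]
      split <;> omega
    show pyFormatGo (litRow r ++ (chunkBody _ ++ _)) args = _
    rw [fmt_lit _ _ _ (litRow_no_brace r), fmt_rep _ _ _ hlt, hm1,
        fmt_lit _ _ _ (by split <;> decide), ih (r + 1) _ (by
          rw [List.length_drop, hlen, needArgs_succ]
          omega)]
    show _ = "row ".toList ++ PySem.Int.toChars (r + 1) ++ ": ".toList ++ _ ++ _
    simp [litRow]

theorem A_fold (n nshow : Int) :
    ∀ (k : Nat) (r : Int) (tpl : List Char), r = nshow - (k : Int) →
      (PySem.List.pyRange r nshow 1).foldl (fun tpl row =>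
        if row < nshow - 1 then
          ((PySem.List.pyRange 1 n 1).foldl (fun t _ => t ++ ", {}".toList)
            (tpl ++ "row ".toList ++ PySem.Int.toChars (row + 1) ++ ": {}".toList)) ++ "; ".toList
        else
          ((PySem.List.pyRange 1 (n - 1) 1).foldl (fun t _ => t ++ ", {}".toList)
            (tpl ++ "row ".toList ++ PySem.Int.toChars (row + 1) ++ ": {}".toList)) ++ ", ".toList) tpl
      = tpl ++ tplFrom n r k := by
  intro k
  induction k with
  | zero =>
    intro r tpl hr
    rw [PySem.List.pyRange_one_eq_nil (a := r) (b := nshow) (by omega)]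
    simp [tplFrom]
  | succ k ih =>
    intro r tpl hr
    rw [PySem.List.pyRange_one_cons (a := r) (b := nshow) (by omega), List.foldl_cons]
    by_cases hk : k = 0
    · subst hk
      have hc : ¬ (r < nshow - 1) := by omega
      simp only [if_neg hc]
      rw [foldl_append_const, PySem.List.length_pyRange_one,
          ih (r + 1) _ (by omega)]
      have h2 : n - 1 - 1 = n - 2 := by omega
      simp [tplFrom, litRow, chunkBody, h2, lit_colon]
    · have hc : r < nshow - 1 := by omega
      simp only [if_pos hc]
      rw [foldl_append_const, PySem.List.length_pyRange_one,
          ih (r + 1) _ (by omega)]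
      simp [tplFrom, litRow, chunkBody, hk, lit_colon]

theorem B_fold (n nshow : Int) (sub : List String) (hn : 2 ≤ n) :
    ∀ (k : Nat) (r : Int) (ps : List (List Char)) (m : Nat), r = nshow - (k : Int) →
      ((PySem.List.pyRange r nshow 1).foldl (fun (st : List (List Char) × Int) row =>
        (st.1 ++ ["row ".toList ++ PySem.Int.toChars (row + 1) ++ ": ".toList ++
            PySem.Chars.join ", ".toList ((PySem.List.slice sub (some st.2)
              (some (st.2 + if row < nshow - 1 then n else n - 1))).map String.toList),
          if row < nshow - 1 then "; ".toList else ", ".toList],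
         st.2 + if row < nshow - 1 then n else n - 1)) (ps, (m : Int))).1.flatten
      = ps.flatten ++ rowsOut n r k (sub.drop m) := by
  intro k
  induction k with
  | zero =>
    intro r ps m hr
    rw [PySem.List.pyRange_one_eq_nil (a := r) (b := nshow) (by omega)]
    simp [rowsOut]
  | succ k ih =>
    intro r ps m hr
    rw [PySem.List.pyRange_one_cons (a := r) (b := nshow) (by omega), List.foldl_cons]
    by_cases hk : k = 0
    · subst hk
      have hc : ¬ (r < nshow - 1) := by omega
      simp only [if_neg hc]
      have hcast : (m : Int) + (n - 1) = (m : Int) + (((n - 1).toNat : Nat) : Int) := by omega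
      have hcast2 : (m : Int) + (((n - 1).toNat : Nat) : Int) = (((m + (n - 1).toNat : Nat) : Nat) : Int) := by omega
      rw [hcast, PySem.List.slice_natCast_add, hcast2,
          ih (r + 1) _ (m + (n - 1).toNat) (by omega)]
      simp [rowsOut]
    · have hc : r < nshow - 1 := by omega
      simp only [if_pos hc]
      have hcast : (m : Int) + n = (m : Int) + ((n.toNat : Nat) : Int) := by omega
      have hcast2 : (m : Int) + ((n.toNat : Nat) : Int) = (((m + n.toNat : Nat) : Nat) : Int) := by omega
      rw [hcast, PySem.List.slice_natCast_add, hcast2,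
          ih (r + 1) _ (m + n.toNat) (by omega)]
      simp [rowsOut, hk, List.drop_drop]

theorem needArgs_int (nn : Int) (hn : 2 ≤ nn) :
    ∀ (k : Nat), 1 ≤ k → (needArgs nn k : Int) = (k : Int) * nn - 1 := by
  intro k
  induction k with
  | zero => intro h; omega
  | succ k ih =>
    intro _
    rw [needArgs_succ]
    by_cases hk : k = 0
    · subst hk; simp [needArgs]; omega
    · rw [if_neg hk]
      have h1 := ih (by omega)
      push_cast
      push_cast at h1
      rw [h1]
      have : ((nn.toNat : Int)) = nn := by omega
      rw [this]; ring

theorem args_length (cs : List String) (n nshow : Int)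
    (hlen : (cs.length : Int) = n * n - 1) (h1 : 1 ≤ nshow) (h2 : nshow ≤ n) (hn : 2 ≤ n) :
    (PySem.List.slice cs (some ((n - nshow) * n)) (some (n ^ 2 - 1))).length =
      needArgs n nshow.toNat := by
  have hp : (0 : Int) ≤ (n - nshow) * n := mul_nonneg (by omega) (by omega)
  have hq' : n ^ 2 - 1 = n * n - 1 := by ring
  rw [hq']
  have hq : (0 : Int) ≤ n * n - 1 := by nlinarith
  have hple : (n - nshow) * n ≤ n * n - n := by nlinarith
  have hexp : (n - nshow) * n = n * n - nshow * n := by ring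
  have hsn : nshow ≤ nshow * n := by nlinarith
  have hsn2 : nshow * n ≤ n * n := by nlinarith
  rw [PySem.List.slice_toNat cs hp hq]
  rw [List.length_take, List.length_drop]
  have hne := needArgs_int n hn nshow.toNat (by omega)
  have hcast : ((nshow.toNat : Nat) : Int) = nshow := by omega
  rw [hcast] at hne
  omega

-- ===== VERDICT (by name: the statement is the Claim_ definition above) =====
theorem branch_style_row_context_py_spec : Claim_equal_branch_style_row_context_py := by
  intro cs n nshow _ hpre
  rcases hpre with ⟨hlen, hcase⟩
  unfold Spec_branch_style_row_context_py branch_style_row_context_py branch_style_row_context_py_alt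
  rw [if_neg (fun h => h hlen), if_neg (fun h => h hlen)]
  rcases hcase with hle | ⟨h1, h2, hn⟩
  · rw [PySem.List.pyRange_one_eq_nil (a := (0 : Int)) (b := nshow) (by omega)]
    rfl
  · dsimp only
    congr 1
    have hA := A_fold n nshow nshow.toNat 0 [] (by omega)
    have hB := B_fold n nshow
      (PySem.List.slice cs (some ((n - nshow) * n)) (some (n ^ 2 - 1))) hn
      nshow.toNat 0 [] 0 (by omega)
    simp only [Nat.cast_zero] at hB
    rw [hA, join_nil_eq_flatten, hB]
    rw [List.nil_append, List.drop_zero, List.flatten_nil, List.nil_append]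
    exact fmt_tpl n hn nshow.toNat _ _ (args_length cs n nshow hlen h1 h2 hn)
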